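-- pv_equiv track=rewrite | github.com/dimitris-karapliafis/rolypolious | src/rolypoly/utils/bio/polars_fastx.py | least_rotation
-- ===== SOURCE A (Python) =====
-- def least_rotation(s: str) -> str:
--     """Finds the lexicographically minimal cyclic shift of a string using Booth's algorithm."""
--     n = len(s)
--     if n == 0:
--         return ""
--
--     s_double = s + s
--
--     # KMP preprocessing failure function
--     f = [-1] * (2 * n)
--     k = 0 # Least starting index
--
--     for j in range(1, 2 * n):
--         i = f[j - k - 1]
--         while i != -1 and s_double[j] != s_double[k + i + 1]:
--             if s_double[j] < s_double[k + i + 1]: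
--                 k = j - i - 1
--             i = f[i]
--
--         if i == -1 and s_double[j] != s_double[k + i + 1]:
--             if s_double[j] < s_double[k + i + 1]:
--                 k = j
--             f[j - k] = -1
--         else:
--             f[j - k] = i + 1
--
--     return s_double[k:k+n]
-- ===== SOURCE B (Python) =====
-- def least_rotation(s: str) -> str:
--     """Finds the lexicographically minimal cyclic shift of a string (brute force over all rotations)."""
--     if len(s) == 0:
--         return ""
--     return min(s[i:] + s[:i] for i in range(len(s)))
-- ===== Notes on version B (the rewrite author's own statement) =====
-- stated objective: simpler
-- what changed: Replaces Booth's O(n) failure-function machinery with a two-line brute force: enumerate every cyclic rotation by slicing and take the lexicographic minimum.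
import Mathlib
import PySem

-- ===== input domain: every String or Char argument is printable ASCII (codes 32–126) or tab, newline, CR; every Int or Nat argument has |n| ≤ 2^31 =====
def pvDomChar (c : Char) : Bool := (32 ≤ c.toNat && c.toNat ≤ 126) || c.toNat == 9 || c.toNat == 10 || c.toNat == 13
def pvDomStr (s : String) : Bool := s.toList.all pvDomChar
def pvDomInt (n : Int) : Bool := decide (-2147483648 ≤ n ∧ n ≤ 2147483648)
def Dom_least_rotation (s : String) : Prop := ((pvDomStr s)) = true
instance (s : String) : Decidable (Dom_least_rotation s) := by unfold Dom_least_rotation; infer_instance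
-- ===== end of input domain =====

-- B replaces Booth's O(n) failure-function algorithm by a plain brute force: take the
-- lexicographic minimum over all n cyclic rotations produced by slicing (objective: simpler).

-- ===== PORT A =====
-- inner `while` loop of A; the fuel argument only makes the recursion total
-- (it is never exhausted: the failure chain i, f[i], f[f[i]], … is strictly decreasing)
def boothChase (d : List Char) (f : List Int) (j : Int) : Nat → Int → Int → Int × Int
  | 0, i, k => (i, k)
  | fuel+1, i, k =>
    if i ≠ -1 ∧ PySem.List.pyGetD d j ' ' ≠ PySem.List.pyGetD d (k+i+1) ' ' then
      let k' := if PySem.List.pyGetD d j ' ' < PySem.List.pyGetD d (k+i+1) ' ' then j - i - 1 else k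
      boothChase d f j fuel (PySem.List.pyGetD f i 0) k'
    else (i, k)

-- one iteration of A's `for j in range(1, 2*n)` loop, state = (f, k)
-- (all list indices used by A are provably in range, so the pyGetD defaults are never used)
def boothStep (d : List Char) (st : List Int × Int) (j : Int) : List Int × Int :=
  let i0 := PySem.List.pyGetD st.1 (j - st.2 - 1) 0
  let r := boothChase d st.1 j (d.length + 1) i0 st.2
  if r.1 = -1 ∧ PySem.List.pyGetD d j ' ' ≠ PySem.List.pyGetD d (r.2 + r.1 + 1) ' ' then
    let k2 := if PySem.List.pyGetD d j ' ' < PySem.List.pyGetD d r.2 ' ' then j else r.2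
    (PySem.List.pySetD st.1 (j - k2) (-1), k2)
  else
    (PySem.List.pySetD st.1 (j - r.2) (r.1 + 1), r.2)

def least_rotation (s : String) : String :=
  let cs := s.toList
  let n : Int := cs.length
  if n = 0 then "" else
    let d := cs ++ cs
    let r := (PySem.List.pyRange 1 (2*n) 1).foldl (boothStep d) (List.replicate (2*n).toNat (-1), 0)
    String.ofList (PySem.List.slice d (some r.2) (some (r.2 + n)))

-- ===== PORT B =====
def least_rotation_alt (s : String) : String :=
  let cs := s.toList
  if cs.length = 0 then "" else
    match PySem.List.min? ((PySem.List.pyRange 0 (cs.length : Int) 1).map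
        (fun i => PySem.List.slice cs (some i) none ++ PySem.List.slice cs none (some i)))
        (fun x => x) with
    | some m => String.ofList m
    | none => ""

-- ===== PRECONDITION & SPEC =====
def Spec_least_rotation (s : String) (out : String) : Prop := out = least_rotation_alt s
instance (s : String) (out : String) : Decidable (Spec_least_rotation s out) := by unfold Spec_least_rotation; infer_instance

-- ===== CLAIM (what is proved, stated in full; the proofs are below) =====
def Claim_equal_least_rotation : Prop := ∀ (s : String), Dom_least_rotation s → Spec_least_rotation s (least_rotation s)

-- ===== LEMMAS AND PROOFS =====

-- the doubled string as a function: gf cs t = (cs ++ cs)[t] for t < 2n, and n-periodic on all of ℕ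
def gf (cs : List Char) (t : ℕ) : Char := cs.getD (t % cs.length) ' '

-- "candidate q agrees with candidate k on the first t characters"
abbrev Eqv (cs : List Char) (q k t : ℕ) : Prop := ∀ u, u < t → gf cs (q+u) = gf cs (k+u)

-- "candidate q is ≥ candidate k on everything seen up to position j" (at the first
-- disagreement within range, k's character is the smaller one)
abbrev DoneLe (cs : List Char) (k j q : ℕ) : Prop :=
  ∀ t, q + t ≤ j → Eqv cs q k t → gf cs (k+t) ≤ gf cs (q+t)

-- "candidate p was strictly beaten by candidate k within the window seen up to j"
def Beat (cs : List Char) (k j p : ℕ) : Prop :=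
  ∃ t, k + t ≤ j ∧ Eqv cs p k t ∧ gf cs (k+t) < gf cs (p+t)

-- "the prefix of length β of candidate k is also a suffix of its prefix of length L"
abbrev Bord (cs : List Char) (k L β : ℕ) : Prop := β < L ∧ Eqv cs (k + (L - β)) k β

-- meaning of a failure-array entry: f[t] = (length of the longest proper border of the
-- (t+1)-prefix of candidate k) - 1, with -1 = no border
def fOK (cs : List Char) (k t : ℕ) (v : ℤ) : Prop :=
  (v = -1 ∧ ∀ β, 0 < β → ¬ Bord cs k (t+1) β) ∨
  (∃ b : ℕ, v = (b:ℤ) ∧ Bord cs k (t+1) (b+1) ∧ ∀ β, b+1 < β → ¬ Bord cs k (t+1) β)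

abbrev fget (f : List ℤ) (t : ℕ) : ℤ := PySem.List.pyGetD f (t:ℤ) 0

lemma beat_intro (cs : List Char) {k j p : ℕ} (t : ℕ) (h1 : k+t ≤ j) (h2 : Eqv cs p k t)
    (h3 : gf cs (k+t) < gf cs (p+t)) : Beat cs k j p := by
  unfold Beat; exact ⟨t, h1, h2, h3⟩

lemma fok_intro_none (cs : List Char) {k t : ℕ} {v : ℤ} (h1 : v = -1)
    (h2 : ∀ β, 0 < β → ¬ Bord cs k (t+1) β) : fOK cs k t v := by
  unfold fOK; exact Or.inl ⟨h1, h2⟩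

lemma fok_intro_some (cs : List Char) {k t : ℕ} {v : ℤ} (b : ℕ) (h1 : v = (b:ℤ))
    (h2 : Bord cs k (t+1) (b+1)) (h3 : ∀ β, b+1 < β → ¬ Bord cs k (t+1) β) : fOK cs k t v := by
  unfold fOK; exact Or.inr ⟨b, h1, h2, h3⟩

-- outer-loop invariant after positions 1..m have been processed
structure INV (cs : List Char) (m : ℕ) (f : List ℤ) (k : ℕ) : Prop where
  k_le : k ≤ m
  k_lt : k < cs.length
  flen : f.length = 2*cs.length
  done : ∀ q, k < q → q ≤ m → DoneLe cs k m q
  beat : ∀ p, p < k → Beat cs k m p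
  fok  : ∀ t, k + t ≤ m → fOK cs k t (fget f t)

-- inner-loop invariant while processing position j
structure LI (cs : List Char) (j : ℕ) (f : List ℤ) (i : ℤ) (k : ℕ) : Prop where
  k_lt  : k < cs.length
  k_ltj : k < j
  i_ge  : -1 ≤ i
  i_lt  : 0 ≤ i → k + i.toNat + 1 < j
  match_ : 0 ≤ i → Eqv cs (j - (i.toNat+1)) k (i.toNat+1)
  beat  : ∀ p, p < k → Beat cs k j p
  pend  : ∀ q, k < q → q ≤ j → DoneLe cs k j q ∨ ((j:ℤ) - (i+1) ≤ (q:ℤ) ∧ Eqv cs q k (j-q))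
  nbord : ∀ γ : ℕ, (i+1:ℤ) < (γ:ℤ) → Bord cs k (j-k) γ → gf cs (k+γ) ≠ gf cs j
  fok   : ∀ t, k + t + 1 ≤ j → fOK cs k t (fget f t)

def rot (cs : List Char) (q : ℕ) : List Char := (List.range cs.length).map (fun t => gf cs (q+t))

-- ---------- basic facts ----------

lemma gf_congr (cs : List Char) {a b : ℕ} (h : a = b) : gf cs a = gf cs b := by rw [h]

lemma gf_add_len (cs : List Char) (t : ℕ) : gf cs (t + cs.length) = gf cs t := by
  simp [gf, Nat.add_mod_right]

lemma fok_ge (cs : List Char) {k t : ℕ} {v : ℤ} (h : fOK cs k t v) : -1 ≤ v := by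
  rcases h with ⟨h1, _⟩ | ⟨b, h1, _, _⟩ <;> omega

lemma fok_lt (cs : List Char) {k t : ℕ} {v : ℤ} (h : fOK cs k t v) : v < (t:ℤ) := by
  rcases h with ⟨h1, _⟩ | ⟨b, h1, hb, _⟩
  · omega
  · have := hb.1; omega

lemma dAt (cs : List Char) (t : ℕ) (ht : t < 2*cs.length) :
    PySem.List.pyGetD (cs ++ cs) (t:ℤ) ' ' = gf cs t := by
  rw [PySem.List.pyGetD_natCast]
  show ((cs ++ cs)[t]?).getD ' ' = gf cs t
  rw [gf]
  rcases Nat.lt_or_ge t cs.length with h | h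
  · rw [List.getElem?_append_left h, Nat.mod_eq_of_lt h, List.getD_eq_getElem?_getD]
  · rw [List.getElem?_append_right h, Nat.mod_eq_sub_mod h, Nat.mod_eq_of_lt (by omega),
      List.getD_eq_getElem?_getD]

lemma dAtI (cs : List Char) (z : ℤ) (h0 : 0 ≤ z) (h2 : z < 2*cs.length) :
    PySem.List.pyGetD (cs ++ cs) z ' ' = gf cs z.toNat := by
  have : z = ((z.toNat : ℕ) : ℤ) := by omega
  rw [this, dAt cs z.toNat (by omega)]
  exact gf_congr cs (by omega)

-- border of a border is a border (transitivity along the failure chain)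
lemma bord_of_bord (cs : List Char) {k L β βs : ℕ} (h1 : Bord cs k L β) (h2 : Bord cs k L βs)
    (hlt : β < βs) : Bord cs k βs β := by
  simp only [Bord, Eqv] at h1 h2 ⊢
  refine ⟨hlt, fun u hu => ?_⟩
  have h2' := h2.2 ((βs-β)+u) (by omega)
  calc gf cs (k + (βs-β)+u) = gf cs (k + ((βs-β)+u)) := gf_congr cs (by omega)
    _ = gf cs (k + (L-βs) + ((βs-β)+u)) := h2'.symm
    _ = gf cs (k + (L-β) + u) := gf_congr cs (by omega)
    _ = gf cs (k + u) := h1.2 u hu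

-- a border relation only inspects the first L characters of candidate k, so it transfers
-- between two candidates that agree on those characters
lemma bord_transfer (cs : List Char) {k k' M L β : ℕ}
    (htr : ∀ x, x ≤ M → gf cs (k'+x) = gf cs (k+x)) (hL : L ≤ M+1) :
    Bord cs k' L β ↔ Bord cs k L β := by
  have key : ∀ a b : ℕ, (∀ x, x ≤ M → gf cs (a+x) = gf cs (b+x)) → Bord cs a L β → Bord cs b L β := by
    intro a b htr' hb
    simp only [Bord, Eqv] at hb ⊢
    obtain ⟨hβL, he⟩ := hb
    refine ⟨hβL, fun u hu => ?_⟩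
    calc gf cs (b + (L-β) + u) = gf cs (b + ((L-β)+u)) := gf_congr cs (by omega)
      _ = gf cs (a + ((L-β)+u)) := (htr' _ (by omega)).symm
      _ = gf cs (a + (L-β) + u) := gf_congr cs (by omega)
      _ = gf cs (a + u) := he u hu
      _ = gf cs (b + u) := htr' u (by omega)
  exact ⟨key k' k htr, key k k' (fun x hx => (htr x hx).symm)⟩

lemma fok_transfer (cs : List Char) {k k' M t : ℕ} {v : ℤ}
    (htr : ∀ x, x ≤ M → gf cs (k'+x) = gf cs (k+x)) (ht : t ≤ M) :
    fOK cs k t v → fOK cs k' t v := by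
  intro h
  rcases h with ⟨h1, h2⟩ | ⟨b, h1, hb, hmax⟩
  · exact fok_intro_none cs h1 (fun β hβ hc => h2 β hβ ((bord_transfer cs htr (by omega)).1 hc))
  · exact fok_intro_some cs b h1 ((bord_transfer cs htr (by omega)).2 hb)
      (fun β hβ hc => hmax β hβ ((bord_transfer cs htr (by omega)).1 hc))

-- pointwise ≤-at-first-mismatch gives lexicographic ≤ on the rotation lists
lemma lex_le_of_fm (m : ℕ) (x y : ℕ → Char)
    (h : ∀ t, t < m → (∀ u, u < t → x u = y u) → x t ≤ y t) :
    ((List.range m).map x) ≤ ((List.range m).map y) := by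
  induction m generalizing x y with
  | zero => simp
  | succ m ih =>
    rw [List.range_succ_eq_map, List.map_cons, List.map_cons, List.map_map, List.map_map]
    have h0 : x 0 ≤ y 0 := h 0 (by omega) (by omega)
    rcases lt_or_eq_of_le h0 with hlt | heq
    · exact le_of_lt (List.lt_iff_lex_lt _ _ |>.2 (List.Lex.rel hlt))
    · have htail : ((List.range m).map (x ∘ Nat.succ)) ≤ ((List.range m).map (y ∘ Nat.succ)) := by
        apply ih
        intro t ht hpre
        exact h (t+1) (by omega) (by intro u hu; cases u with
          | zero => exact heq
          | succ v => exact hpre v (by omega))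
      rcases lt_or_eq_of_le htail with h2 | h2
      · refine le_of_lt (List.lt_iff_lex_lt _ _ |>.2 ?_)
        rw [heq]
        exact List.Lex.cons (List.lt_iff_lex_lt _ _ |>.1 h2)
      · rw [heq, h2]


-- ---------- the two possible updates inside the while loop ----------

-- the mismatched character of the candidate is larger: k is kept, i follows the failure link
lemma li_stay (cs : List Char) {j : ℕ} {f : List ℤ} {i : ℤ} {k : ℕ}
    (hLI : LI cs j f i k) (h0i : 0 ≤ i)
    (hgt : gf cs (k + i.toNat + 1) < gf cs j) :
    LI cs j f (fget f i.toNat) k := by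
  set β := i.toNat with hβdef
  have hiβ : i = (β:ℤ) := (Int.toNat_of_nonneg h0i).symm
  have hkβj : k + β + 1 < j := hLI.i_lt h0i
  have hmatch : Eqv cs (j - (β+1)) k (β+1) := hLI.match_ h0i
  have hfok : fOK cs k β (fget f β) := hLI.fok β (by omega)
  set v := fget f β with hvdef
  have hvge : -1 ≤ v := fok_ge cs hfok
  have hbordfull : Bord cs k (j-k) (β+1) := by
    refine ⟨by omega, fun u hu => ?_⟩
    calc gf cs (k + ((j-k)-(β+1)) + u) = gf cs ((j-(β+1)) + u) := gf_congr cs (by omega)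
      _ = gf cs (k+u) := hmatch u hu
  refine ⟨hLI.k_lt, hLI.k_ltj, fok_ge cs hfok, ?_, ?_, hLI.beat, ?_, ?_, hLI.fok⟩
  · -- i_lt
    intro h0v
    rcases hfok with ⟨hv1, _⟩ | ⟨b, hv1, hb, _⟩
    · omega
    · have := hb.1; omega
  · -- match_
    intro h0v
    rcases hfok with ⟨hv1, _⟩ | ⟨b, hv1, hb, _⟩
    · omega
    · have hvb : v.toNat = b := by omega
      have hbβ : b < β := by have := hb.1; omega
      rw [hvb]
      intro u hu
      calc gf cs ((j-(b+1)) + u) = gf cs ((j-(β+1)) + ((β-b)+u)) := gf_congr cs (by omega)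
        _ = gf cs (k + ((β-b)+u)) := hmatch _ (by omega)
        _ = gf cs (k + ((β+1)-(b+1)) + u) := gf_congr cs (by omega)
        _ = gf cs (k+u) := hb.2 u hu
  · -- pend
    intro q hkq hqj
    rcases hLI.pend q hkq hqj with hdone | ⟨hge, heqv⟩
    · exact Or.inl hdone
    · by_cases hge2 : (j:ℤ) - (v+1) ≤ (q:ℤ)
      · exact Or.inr ⟨hge2, heqv⟩
      · left
        have hγle : j - q ≤ β + 1 := by omega
        by_cases hcase : j - q = β + 1
        · intro t hqt heqvt
          rcases Nat.lt_or_ge t (j-q) with h | h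
          · exact le_of_eq (heqv t h).symm
          · have htq : t = j - q := by omega
            have e1 : gf cs (q+t) = gf cs j := gf_congr cs (by omega)
            have e2 : gf cs (k+t) = gf cs (k+β+1) := gf_congr cs (by omega)
            rw [e1, e2]; exact le_of_lt hgt
        · exfalso
          have hbord : Bord cs k (β+1) (j-q) := by
            refine ⟨by omega, fun u hu => ?_⟩
            calc gf cs (k + ((β+1)-(j-q)) + u)
                = gf cs (k + (((β+1)-(j-q))+u)) := gf_congr cs (by omega)
              _ = gf cs ((j-(β+1)) + (((β+1)-(j-q))+u)) := (hmatch _ (by omega)).symm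
              _ = gf cs (q + u) := gf_congr cs (by omega)
              _ = gf cs (k + u) := heqv u hu
          rcases hfok with ⟨hv1, hmax⟩ | ⟨b, hv1, hb, hmax⟩
          · exact hmax (j-q) (by omega) hbord
          · exact hmax (j-q) (by omega) hbord
  · -- nbord
    intro γ hγv hbord
    rcases Nat.lt_trichotomy γ (β+1) with h | h | h
    · exfalso
      have hbb : Bord cs k (β+1) γ := bord_of_bord cs hbord hbordfull h
      rcases hfok with ⟨hv1, hmax⟩ | ⟨b, hv1, hb, hmax⟩
      · exact hmax γ (by omega) hbb
      · exact hmax γ (by omega) hbb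
    · intro hEq
      rw [show k + γ = k + β + 1 by omega] at hEq
      exact absurd hEq (ne_of_lt hgt)
    · exact hLI.nbord γ (by omega) hbord

-- the mismatched character of the candidate is smaller: k jumps to the candidate j-i-1
lemma li_move (cs : List Char) {j : ℕ} {f : List ℤ} {i : ℤ} {k : ℕ}
    (hLI : LI cs j f i k) (h0i : 0 ≤ i)
    (hlt : gf cs j < gf cs (k + i.toNat + 1)) :
    LI cs j f (fget f i.toNat) (j - i.toNat - 1) := by
  set β := i.toNat with hβdef
  have hiβ : i = (β:ℤ) := (Int.toNat_of_nonneg h0i).symm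
  have hkβj : k + β + 1 < j := hLI.i_lt h0i
  set kn := j - β - 1 with hkndef
  have hkkn : k < kn := by omega
  have hmatch : Eqv cs (j - (β+1)) k (β+1) := hLI.match_ h0i
  have htr : ∀ x, x ≤ β → gf cs (kn + x) = gf cs (k + x) := fun x hx =>
    (gf_congr cs (by omega)).trans (hmatch x (by omega))
  have hj : gf cs (kn + (β+1)) = gf cs j := gf_congr cs (by omega)
  have hfok : fOK cs k β (fget f β) := hLI.fok β (by omega)
  have hn1 : 1 ≤ cs.length := by have := hLI.k_lt; omega
  have hknn : kn < cs.length := by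
    by_contra hge
    push_neg at hge
    set q := kn - cs.length with hqdef
    have hper : ∀ x : ℕ, gf cs (q + x) = gf cs (kn + x) := fun x =>
      (gf_add_len cs (q+x)).symm.trans (gf_congr cs (by omega))
    have hqj : gf cs (q + (β+1)) = gf cs j := (hper (β+1)).trans hj
    rcases Nat.lt_trichotomy q k with hqk | hqk | hqk
    · obtain ⟨t, htle, heqv, hstr⟩ := hLI.beat q hqk
      rcases Nat.lt_trichotomy t (β+1) with h | h | h
      · have : gf cs (q+t) = gf cs (k+t) := (hper t).trans (htr t (by omega))
        rw [this] at hstr; exact lt_irrefl _ hstr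
      · have e : gf cs (q+t) = gf cs j := by rw [show t = β+1 from h] at *; exact hqj
        rw [e] at hstr
        rw [show t = β+1 from h] at hstr
        exact absurd (hstr.trans hlt) (lt_irrefl _)
      · have := heqv (β+1) (by omega)
        rw [hqj] at this
        exact absurd this (ne_of_lt hlt)
    · have : gf cs (k + (β+1)) = gf cs j := by rw [← hqk]; exact hqj
      rw [show k + (β+1) = k + β + 1 by omega] at this
      exact absurd this.symm (ne_of_lt hlt)
    · rcases hLI.pend q hqk (by omega) with hdone | ⟨hge2, heqv⟩
      · have heq : Eqv cs q k (β+1) := fun u hu => (hper u).trans (htr u (by omega))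
        have hD := hdone (β+1) (by omega) heq
        have hD2 : gf cs (k+β+1) ≤ gf cs j := by
          calc gf cs (k+β+1) = gf cs (k+(β+1)) := gf_congr cs (by omega)
            _ ≤ gf cs (q+(β+1)) := hD
            _ = gf cs j := hqj
        exact absurd hlt (not_lt.mpr hD2)
      · have := heqv (β+1) (by omega)
        rw [hqj] at this
        rw [show k + (β+1) = k + β + 1 by omega] at this
        exact absurd this (ne_of_lt hlt)
  set v := fget f β with hvdef
  have hvge : -1 ≤ v := fok_ge cs hfok
  refine ⟨hknn, by omega, fok_ge cs hfok, ?_, ?_, ?_, ?_, ?_, ?_⟩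
  · intro h0v
    rcases hfok with ⟨hv1, _⟩ | ⟨b, hv1, hb, _⟩
    · omega
    · have := hb.1; omega
  · intro h0v
    rcases hfok with ⟨hv1, _⟩ | ⟨b, hv1, hb, _⟩
    · omega
    · have hvb : v.toNat = b := by omega
      have hbβ : b < β := by have := hb.1; omega
      rw [hvb]
      intro u hu
      calc gf cs ((j-(b+1)) + u) = gf cs (kn + ((β-b)+u)) := gf_congr cs (by omega)
        _ = gf cs (k + ((β-b)+u)) := htr _ (by omega)
        _ = gf cs (k + ((β+1)-(b+1)) + u) := gf_congr cs (by omega)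
        _ = gf cs (k+u) := hb.2 u hu
        _ = gf cs (kn+u) := (htr u (by omega)).symm
  · -- beat
    intro p hp
    rcases Nat.lt_trichotomy p k with hpk | hpk | hpk
    · obtain ⟨t, htle, heqv, hstr⟩ := hLI.beat p hpk
      rcases Nat.lt_or_ge t (β+1) with h | h
      · exact beat_intro cs t (by omega) (fun u hu => (heqv u hu).trans (htr u (by omega)).symm)
          (by rw [htr t (by omega)]; exact hstr)
      · refine beat_intro cs (β+1) (by omega) (fun u hu => (heqv u (by omega)).trans (htr u (by omega)).symm) ?_
        rw [hj]
        rcases Nat.eq_or_lt_of_le h with he | hgt2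
        · have : gf cs (k+β+1) < gf cs (p+(β+1)) := by
            rw [show p + (β+1) = p + t by omega, show k+β+1 = k + t by omega]; exact hstr
          exact hlt.trans this
        · have : gf cs (p+(β+1)) = gf cs (k+(β+1)) := heqv (β+1) (by omega)
          rw [this, show k + (β+1) = k+β+1 by omega]; exact hlt
    · refine beat_intro cs (β+1) (by omega) (fun u hu => ?_) ?_
      · rw [hpk]; exact (htr u (by omega)).symm
      · rw [hj, hpk]
        calc gf cs j < gf cs (k+β+1) := hlt
          _ = gf cs (k+(β+1)) := gf_congr cs (by omega)
    · rcases hLI.pend p hpk (by omega) with hdone | ⟨hge2, _⟩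
      · by_cases hEp : Eqv cs p k (β+1)
        · have hD := hdone (β+1) (by omega) hEp
          refine beat_intro cs (β+1) (by omega) (fun u hu => (hEp u hu).trans (htr u (by omega)).symm) ?_
          rw [hj]
          calc gf cs j < gf cs (k+β+1) := hlt
            _ = gf cs (k+(β+1)) := gf_congr cs (by omega)
            _ ≤ gf cs (p+(β+1)) := hD
        · have hex : ∃ t, t < β+1 ∧ gf cs (p+t) ≠ gf cs (k+t) := by
            by_contra hno
            push_neg at hno
            exact hEp (fun u hu => hno u hu)
          obtain ⟨ht0lt, ht0ne⟩ := Nat.find_spec hex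
          set t0 := Nat.find hex with ht0def
          have hmin : ∀ u, u < t0 → gf cs (p+u) = gf cs (k+u) := by
            intro u hu
            have h2 := Nat.find_min hex hu
            push_neg at h2
            exact h2 (by omega)
          have hD := hdone t0 (by omega) hmin
          refine beat_intro cs t0 (by omega) (fun u hu => (hmin u hu).trans (htr u (by omega)).symm) ?_
          rw [htr t0 (by omega)]
          exact lt_of_le_of_ne hD (Ne.symm ht0ne)
      · exfalso
        have : ((j:ℤ) - (i+1)) ≤ (p:ℤ) := hge2
        omega
  · -- pend
    intro q hknq hqj2
    have hkq : k < q := by omega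
    rcases hLI.pend q hkq hqj2 with hdone | ⟨hge2, heqv⟩
    · left
      intro t hqt heqvn
      have htβ : t ≤ β := by omega
      have heqk : Eqv cs q k t := fun u hu => (heqvn u hu).trans (htr u (by omega))
      have := hdone t hqt heqk
      rw [htr t htβ]
      exact this
    · have hγβ : j - q ≤ β := by omega
      have heqvkn : Eqv cs q kn (j-q) := fun u hu => (heqv u hu).trans (htr u (by omega)).symm
      by_cases hge3 : (j:ℤ) - (v+1) ≤ (q:ℤ)
      · exact Or.inr ⟨hge3, heqvkn⟩
      · exfalso
        have hbkn : Bord cs kn (β+1) (j-q) := by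
          refine ⟨by omega, fun u hu => ?_⟩
          calc gf cs (kn + ((β+1)-(j-q)) + u) = gf cs (q+u) := gf_congr cs (by omega)
            _ = gf cs (kn+u) := heqvkn u hu
        have hbk : Bord cs k (β+1) (j-q) := (bord_transfer cs htr (by omega)).1 hbkn
        rcases hfok with ⟨hv1, hmax⟩ | ⟨b, hv1, hb, hmax⟩
        · exact hmax (j-q) (by omega) hbk
        · exact hmax (j-q) (by omega) hbk
  · -- nbord
    intro γ hγv hbord
    exfalso
    rw [show j - kn = β+1 by omega] at hbord
    have hbk : Bord cs k (β+1) γ := (bord_transfer cs htr (by omega)).1 hbord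
    rcases hfok with ⟨hv1, hmax⟩ | ⟨b, hv1, hb, hmax⟩
    · exact hmax γ (by omega) hbk
    · exact hmax γ (by omega) hbk
  · -- fok
    intro t ht
    exact fok_transfer cs htr (by omega) (hLI.fok t (by omega))


-- ---------- list update / doubled-list facts ----------
lemma length_pySetD (f : List ℤ) (i : ℤ) (v : ℤ) : (PySem.List.pySetD f i v).length = f.length := by
  simp [PySem.List.pySetD, PySem.List.pySet?, PySem.List.pyIdx?]
  split
  · split <;> simp
  · split <;> simp

lemma fget_set (f : List ℤ) (idx : ℕ) (hidx : idx < f.length) (v : ℤ) (t : ℕ) :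
    fget (PySem.List.pySetD f (idx:ℤ) v) t = if t = idx then v else fget f t :=
  PySem.List.pyGetD_pySetD_natCast f idx t v 0 hidx

lemma gf_append (cs : List Char) (x : ℕ) (hx : x < (cs++cs).length) : (cs++cs)[x] = gf cs x := by
  rw [List.length_append] at hx
  rw [gf]
  rcases Nat.lt_or_ge x cs.length with h | h
  · rw [List.getElem_append_left h, Nat.mod_eq_of_lt h,
      List.getD_eq_getElem?_getD, List.getElem?_eq_getElem h]
    rfl
  · rw [List.getElem_append_right h, Nat.mod_eq_sub_mod h, Nat.mod_eq_of_lt (by omega),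
      List.getD_eq_getElem?_getD, List.getElem?_eq_getElem (by omega)]
    rfl

-- a border of the one-longer prefix restricts to a border of the prefix, with matching last character
lemma bord_snoc (cs : List Char) {k L δ : ℕ} (hδ : 1 ≤ δ) (h : Bord cs k (L+1) δ) :
    Bord cs k L (δ-1) ∧ gf cs (k+(δ-1)) = gf cs (k+L) := by
  obtain ⟨h1, h2⟩ := h
  constructor
  · refine ⟨by omega, fun u hu => ?_⟩
    calc gf cs (k + (L - (δ-1)) + u) = gf cs (k + (L+1-δ) + u) := gf_congr cs (by omega)
      _ = gf cs (k + u) := h2 u (by omega)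
  · have h3 := h2 (δ-1) (by omega)
    calc gf cs (k + (δ-1)) = gf cs (k + (L+1-δ) + (δ-1)) := h3.symm
      _ = gf cs (k + L) := gf_congr cs (by omega)

-- ---------- the three ways an outer-loop iteration ends ----------

-- exit on a matching character: k is kept and f[j-k] := i'+1
lemma inv_exit_match (cs : List Char) {j : ℕ} {f : List ℤ} {i' : ℤ} {k' : ℕ}
    (hflen : f.length = 2*cs.length) (hj2 : j < 2*cs.length)
    (hLI : LI cs j f i' k') (heqc : gf cs j = gf cs (k' + (i'+1).toNat)) :
    INV cs j (PySem.List.pySetD f (((j - k' : ℕ)):ℤ) (i'+1)) k' := by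
  have hk'j := hLI.k_ltj
  have hige := hLI.i_ge
  have hidx : j - k' < f.length := by omega
  have hset := fget_set f (j-k') hidx (i'+1)
  refine ⟨by omega, hLI.k_lt, by rw [length_pySetD]; exact hflen, ?_, hLI.beat, ?_⟩
  · -- done
    intro q hkq hqj
    rcases hLI.pend q hkq hqj with hdone | ⟨hge, hEqv⟩
    · exact hdone
    · intro t hqt heqvt
      rcases Nat.lt_or_ge t (j-q) with hlt | hgeq
      · exact le_of_eq (hEqv t hlt).symm
      · have htγ : t = j - q := by omega
        set B := (i'+1).toNat with hBdef
        have hγB : j - q ≤ B := by omega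
        have e1 : gf cs (q + t) = gf cs j := gf_congr cs (by omega)
        rcases Nat.eq_or_lt_of_le hγB with heB | hltB
        · rw [e1, heqc]
          exact le_of_eq (gf_congr cs (by omega))
        · have h0i : 0 ≤ i' := by omega
          have hkBj : k' + B < j := by have := hLI.i_lt h0i; omega
          have hmatch := hLI.match_ h0i
          have hBb : Bord cs k' (j-k') B := by
            refine ⟨by omega, fun u hu => ?_⟩
            calc gf cs (k' + ((j-k') - B) + u) = gf cs ((j - (i'.toNat+1)) + u) := gf_congr cs (by omega)
              _ = gf cs (k' + u) := hmatch u (by omega)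
          have hγb : Bord cs k' (j-k') (j-q) := by
            refine ⟨by omega, fun u hu => ?_⟩
            calc gf cs (k' + ((j-k') - (j-q)) + u) = gf cs (q + u) := gf_congr cs (by omega)
              _ = gf cs (k' + u) := hEqv u hu
          have hsub : Bord cs k' B (j-q) := bord_of_bord cs hγb hBb hltB
          set p := k' + (B - (j-q)) with hpdef
          have hkp : k' < p := by omega
          have hpj : p ≤ j := by omega
          have hEqp : Eqv cs p k' (j-q) := hsub.2
          have hgoal : gf cs (k' + (j-q)) ≤ gf cs (k' + B) := by
            rcases hLI.pend p hkp hpj with hdonep | ⟨_, hEqvp⟩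
            · calc gf cs (k' + (j-q)) ≤ gf cs (p + (j-q)) := hdonep (j-q) (by omega) hEqp
                _ = gf cs (k' + B) := gf_congr cs (by omega)
            · have he2 : gf cs (k' + (j-q)) = gf cs (k' + B) := by
                calc gf cs (k' + (j-q)) = gf cs (p + (j-q)) := (hEqvp (j-q) (by omega)).symm
                  _ = gf cs (k' + B) := gf_congr cs (by omega)
              exact le_of_eq he2
          rw [e1, heqc]
          calc gf cs (k' + t) = gf cs (k' + (j-q)) := gf_congr cs (by omega)
            _ ≤ gf cs (k' + B) := hgoal
  · -- fok
    intro t hkt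
    rw [hset t]
    by_cases ht : t = j - k'
    · rw [if_pos ht, ht]
      rcases (by omega : i' = -1 ∨ 0 ≤ i') with hi | hi
      · refine fok_intro_some cs 0 (by omega) ?_ ?_
        · refine ⟨by omega, fun u hu => ?_⟩
          have hu0 : u = 0 := by omega
          subst hu0
          calc gf cs (k' + ((j-k'+1) - 1) + 0) = gf cs j := gf_congr cs (by omega)
            _ = gf cs (k' + 0) := by rw [heqc]; exact gf_congr cs (by omega)
        · intro δ hδ hbord
          obtain ⟨hb1, hb2⟩ := bord_snoc cs (by omega) hbord
          exact hLI.nbord (δ-1) (by omega) hb1 (hb2.trans (gf_congr cs (by omega)))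
      · have hmatch := hLI.match_ hi
        have hkBj := hLI.i_lt hi
        refine fok_intro_some cs (i'.toNat+1) (by omega) ?_ ?_
        · refine ⟨by omega, fun u hu => ?_⟩
          rcases Nat.lt_or_ge u (i'.toNat+1) with hu2 | hu2
          · calc gf cs (k' + ((j-k'+1) - (i'.toNat+1+1)) + u)
                = gf cs ((j - (i'.toNat+1)) + u) := gf_congr cs (by omega)
              _ = gf cs (k' + u) := hmatch u (by omega)
          · have hu3 : u = i'.toNat+1 := by omega
            subst hu3
            calc gf cs (k' + ((j-k'+1) - (i'.toNat+1+1)) + (i'.toNat+1)) = gf cs j := gf_congr cs (by omega)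
              _ = gf cs (k' + (i'.toNat+1)) := by rw [heqc]; exact gf_congr cs (by omega)
        · intro δ hδ hbord
          obtain ⟨hb1, hb2⟩ := bord_snoc cs (by omega) hbord
          exact hLI.nbord (δ-1) (by omega) hb1 (hb2.trans (gf_congr cs (by omega)))
    · rw [if_neg ht]
      exact hLI.fok t (by omega)

-- exit on a mismatch whose character is larger: k is kept and f[j-k] := -1
lemma inv_exit_gt (cs : List Char) {j : ℕ} {f : List ℤ} {k' : ℕ}
    (hflen : f.length = 2*cs.length) (hj2 : j < 2*cs.length)
    (hLI : LI cs j f (-1) k') (hgt : gf cs k' < gf cs j) :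
    INV cs j (PySem.List.pySetD f (((j - k' : ℕ)):ℤ) (-1)) k' := by
  have hk'j := hLI.k_ltj
  have hidx : j - k' < f.length := by omega
  have hset := fget_set f (j-k') hidx (-1)
  refine ⟨by omega, hLI.k_lt, by rw [length_pySetD]; exact hflen, ?_, hLI.beat, ?_⟩
  · intro q hkq hqj
    rcases hLI.pend q hkq hqj with hdone | ⟨hge, hEqv⟩
    · exact hdone
    · have hq : q = j := by omega
      subst hq
      intro t hqt heqvt
      have ht0 : t = 0 := by omega
      subst ht0
      simpa using le_of_lt hgt
  · intro t hkt
    rw [hset t]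
    by_cases ht : t = j - k'
    · rw [if_pos ht, ht]
      refine fok_intro_none cs rfl ?_
      intro δ hδ hbord
      rcases Nat.lt_or_ge 1 δ with h2 | h2
      · obtain ⟨hb1, hb2⟩ := bord_snoc cs (by omega) hbord
        exact hLI.nbord (δ-1) (by omega) hb1 (hb2.trans (gf_congr cs (by omega)))
      · have hδ1 : δ = 1 := by omega
        subst hδ1
        obtain ⟨hb1, hb2⟩ := hbord
        have h3 := hb2 0 (by omega)
        have he : gf cs j = gf cs k' := by
          calc gf cs j = gf cs (k' + ((j-k'+1) - 1) + 0) := gf_congr cs (by omega)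
            _ = gf cs (k' + 0) := h3
            _ = gf cs k' := gf_congr cs (by omega)
        exact absurd he.symm (ne_of_lt hgt)
    · rw [if_neg ht]
      exact hLI.fok t (by omega)

-- exit on a mismatch whose character is smaller: k := j and f[0] := -1
lemma inv_exit_lt (cs : List Char) {j : ℕ} {f : List ℤ} {k' : ℕ}
    (hflen : f.length = 2*cs.length) (hj2 : j < 2*cs.length)
    (hLI : LI cs j f (-1) k') (hlt : gf cs j < gf cs k') :
    j < cs.length ∧ INV cs j (PySem.List.pySetD f (((0:ℕ)):ℤ) (-1)) j := by
  have hk'j := hLI.k_ltj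
  have hn1 : 1 ≤ cs.length := by have := hLI.k_lt; omega
  have hjn : j < cs.length := by
    by_contra hge
    push_neg at hge
    set q := j - cs.length with hq
    have hper : gf cs q = gf cs j := by
      calc gf cs q = gf cs (q + cs.length) := (gf_add_len cs q).symm
        _ = gf cs j := gf_congr cs (by omega)
    rcases Nat.lt_trichotomy q k' with h1 | h1 | h1
    · obtain ⟨t, ht1, ht2, ht3⟩ := hLI.beat q h1
      rcases Nat.eq_zero_or_pos t with h2 | h2
      · subst h2
        have he : gf cs k' < gf cs j := by
          calc gf cs k' = gf cs (k'+0) := gf_congr cs (by omega)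
            _ < gf cs (q+0) := ht3
            _ = gf cs q := gf_congr cs (by omega)
            _ = gf cs j := hper
        exact absurd (hlt.trans he) (lt_irrefl _)
      · have h3 := ht2 0 h2
        have he : gf cs j = gf cs k' := by
          calc gf cs j = gf cs q := hper.symm
            _ = gf cs (q+0) := gf_congr cs (by omega)
            _ = gf cs (k'+0) := h3
            _ = gf cs k' := gf_congr cs (by omega)
        exact absurd he (ne_of_lt hlt)
    · have he : gf cs j = gf cs k' := by rw [← hper, h1]
      exact absurd he (ne_of_lt hlt)
    · rcases hLI.pend q h1 (by omega) with hdone | ⟨hge2, _⟩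
      · have h3 := hdone 0 (by omega) (fun u hu => absurd hu (by omega))
        have he : gf cs k' ≤ gf cs j := by
          calc gf cs k' = gf cs (k'+0) := gf_congr cs (by omega)
            _ ≤ gf cs (q+0) := h3
            _ = gf cs q := gf_congr cs (by omega)
            _ = gf cs j := hper
        exact absurd hlt (not_lt.mpr he)
      · omega
  refine ⟨hjn, by omega, hjn, by rw [length_pySetD]; exact hflen, ?_, ?_, ?_⟩
  · intro q h1 h2
    omega
  · intro p hp
    refine beat_intro cs 0 (by omega) (fun u hu => absurd hu (by omega)) ?_
    have hgoal : gf cs (j+0) = gf cs j := gf_congr cs (by omega)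
    rcases Nat.lt_trichotomy p k' with h1 | h1 | h1
    · obtain ⟨t, ht1, ht2, ht3⟩ := hLI.beat p h1
      rw [hgoal]
      rcases Nat.eq_zero_or_pos t with h2 | h2
      · subst h2
        calc gf cs j < gf cs k' := hlt
          _ = gf cs (k'+0) := gf_congr cs (by omega)
          _ < gf cs (p+0) := ht3
      · calc gf cs j < gf cs k' := hlt
          _ = gf cs (k'+0) := gf_congr cs (by omega)
          _ = gf cs (p+0) := (ht2 0 h2).symm
    · rw [hgoal, h1]
      calc gf cs j < gf cs k' := hlt
        _ = gf cs (k'+0) := gf_congr cs (by omega)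
    · rcases hLI.pend p h1 (by omega) with hdone | ⟨hge2, _⟩
      · have h3 := hdone 0 (by omega) (fun u hu => absurd hu (by omega))
        rw [hgoal]
        calc gf cs j < gf cs k' := hlt
          _ = gf cs (k'+0) := gf_congr cs (by omega)
          _ ≤ gf cs (p+0) := h3
      · exfalso
        omega
  · intro t hkt
    have ht0 : t = 0 := by omega
    subst ht0
    rw [fget_set f 0 (by omega) (-1) 0, if_pos rfl]
    refine fok_intro_none cs rfl ?_
    intro δ hδ hbord
    have := hbord.1
    omega

-- ---------- the inner while loop ----------
lemma chase_spec (cs : List Char) (j : ℕ) (hj2 : j < 2*cs.length) :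
    ∀ (fuel : ℕ) (i : ℤ) (k : ℕ) (f : List ℤ), LI cs j f i k → (i+1).toNat < fuel →
    ∃ (i' : ℤ) (k' : ℕ), boothChase (cs++cs) f (j:ℤ) fuel i (k:ℤ) = (i', (k':ℤ)) ∧
      LI cs j f i' k' ∧ (0 ≤ i' → gf cs j = gf cs (k' + i'.toNat + 1)) := by
  intro fuel
  induction fuel with
  | zero => intro i k f hLI hfuel; omega
  | succ fuel ih =>
    intro i k f hLI hfuel
    have hige := hLI.i_ge
    have hkn := hLI.k_lt
    have hkj := hLI.k_ltj
    have hdj : PySem.List.pyGetD (cs++cs) (j:ℤ) ' ' = gf cs j := dAt cs j hj2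
    have hbnd : ((k:ℤ)+i+1) < 2*(cs.length:ℤ) := by
      by_cases h0 : 0 ≤ i
      · have h1 := hLI.i_lt h0; omega
      · omega
    have hE : PySem.List.pyGetD (cs++cs) ((k:ℤ)+i+1) ' ' = gf cs (((k:ℤ)+i+1).toNat) :=
      dAtI cs _ (by omega) (by push_cast; omega)
    by_cases hC : (i ≠ -1 ∧ PySem.List.pyGetD (cs++cs) (j:ℤ) ' ' ≠ PySem.List.pyGetD (cs++cs) ((k:ℤ)+i+1) ' ')
    · obtain ⟨hine, hne⟩ := hC
      have h0i : 0 ≤ i := by omega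
      have hkβj := hLI.i_lt h0i
      have hEE : gf cs (((k:ℤ)+i+1).toNat) = gf cs (k + i.toNat + 1) := gf_congr cs (by omega)
      have hne' : gf cs j ≠ gf cs (k + i.toNat + 1) := by
        rw [hdj, hE, hEE] at hne; exact hne
      have hfok := hLI.fok i.toNat (by omega)
      have hfv : PySem.List.pyGetD f i 0 = fget f i.toNat := by
        conv_lhs => rw [show i = ((i.toNat:ℕ):ℤ) from by omega]
      have hvlt : fget f i.toNat < i := by have := fok_lt cs hfok; omega
      have hvge : -1 ≤ fget f i.toNat := fok_ge cs hfok
      have hfuel2 : ((fget f i.toNat)+1).toNat < fuel := by omega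
      have hunf : boothChase (cs++cs) f (j:ℤ) (fuel+1) i (k:ℤ) =
          boothChase (cs++cs) f (j:ℤ) fuel (PySem.List.pyGetD f i 0)
            (if PySem.List.pyGetD (cs++cs) (j:ℤ) ' ' < PySem.List.pyGetD (cs++cs) ((k:ℤ)+i+1) ' '
              then (j:ℤ) - i - 1 else (k:ℤ)) := by
        show (if _ ∧ _ then _ else _) = _
        rw [if_pos ⟨hine, hne⟩]
      by_cases hcmp : PySem.List.pyGetD (cs++cs) (j:ℤ) ' ' < PySem.List.pyGetD (cs++cs) ((k:ℤ)+i+1) ' '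
      · have hlt2 : gf cs j < gf cs (k + i.toNat + 1) := by
          rw [hdj, hE, hEE] at hcmp; exact hcmp
        obtain ⟨i', k', heq, hLI', hexit⟩ :=
          ih (fget f i.toNat) (j - i.toNat - 1) f (li_move cs hLI h0i hlt2) hfuel2
        refine ⟨i', k', ?_, hLI', hexit⟩
        rw [hunf, if_pos hcmp, hfv, show (j:ℤ) - i - 1 = ((j - i.toNat - 1 : ℕ):ℤ) from by omega]
        exact heq
      · have hgt2 : gf cs (k + i.toNat + 1) < gf cs j := by
          have hle := not_lt.mp hcmp
          rw [hdj, hE, hEE] at hle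
          exact lt_of_le_of_ne hle (Ne.symm hne')
        obtain ⟨i', k', heq, hLI', hexit⟩ :=
          ih (fget f i.toNat) k f (li_stay cs hLI h0i hgt2) hfuel2
        refine ⟨i', k', ?_, hLI', hexit⟩
        rw [hunf, if_neg hcmp, hfv]
        exact heq
    · refine ⟨i, k, ?_, hLI, ?_⟩
      · show (if _ ∧ _ then _ else _) = _
        rw [if_neg hC]
      · intro h0i
        rcases not_and_or.mp hC with h | h
        · exfalso; exact absurd (not_not.mp h) (by omega)
        · have h2 := not_not.mp h
          rw [hdj, hE] at h2
          exact h2.trans (gf_congr cs (by omega))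

-- ---------- one outer-loop step ----------
lemma step_spec (cs : List Char) (j : ℕ) (hj1 : 1 ≤ j) (hj2 : j < 2*cs.length)
    (f : List ℤ) (k : ℕ) (h : INV cs (j-1) f k) :
    ∃ (f' : List ℤ) (k' : ℕ),
      boothStep (cs++cs) (f, (k:ℤ)) (j:ℤ) = (f', (k':ℤ)) ∧ INV cs j f' k' := by
  have hkj : k ≤ j - 1 := h.k_le
  have hkn := h.k_lt
  have hn1 : 1 ≤ cs.length := by omega
  have hflen := h.flen
  have hfok0 := h.fok (j-1-k) (by omega)
  have hvge : -1 ≤ fget f (j-1-k) := fok_ge cs hfok0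
  have hvlt : fget f (j-1-k) < ((j-1-k:ℕ):ℤ) := fok_lt cs hfok0
  have hi0 : PySem.List.pyGetD f ((j:ℤ) - (k:ℤ) - 1) 0 = fget f (j-1-k) := by
    conv_lhs => rw [show (j:ℤ)-(k:ℤ)-1 = ((j-1-k : ℕ):ℤ) from by omega]
  have hLI : LI cs j f (fget f (j-1-k)) k := by
    refine ⟨hkn, by omega, hvge, ?_, ?_, ?_, ?_, ?_, ?_⟩
    · intro h0v
      rcases hfok0 with ⟨hv1,_⟩ | ⟨b, hv1, hb, _⟩
      · omega
      · have := hb.1; omega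
    · intro h0v
      rcases hfok0 with ⟨hv1,_⟩ | ⟨b, hv1, hb, _⟩
      · omega
      · have hbb := hb.1
        have hvb : (fget f (j-1-k)).toNat = b := by omega
        rw [hvb]
        intro u hu
        calc gf cs ((j - (b+1)) + u) = gf cs (k + (((j-1-k)+1) - (b+1)) + u) := gf_congr cs (by omega)
          _ = gf cs (k+u) := hb.2 u hu
    · intro p hp
      obtain ⟨t, h1, h2, h3⟩ := h.beat p hp
      exact beat_intro cs t (by omega) h2 h3
    · intro q hkq hqj
      rcases Nat.eq_or_lt_of_le hqj with he | hlt2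
      · refine Or.inr ⟨by omega, fun u hu => absurd hu (by omega)⟩
      · have hD := h.done q hkq (by omega)
        by_cases hEq : Eqv cs q k (j - q)
        · by_cases hge : ((j:ℤ) - (fget f (j-1-k) + 1)) ≤ (q:ℤ)
          · exact Or.inr ⟨hge, hEq⟩
          · exfalso
            have hbord : Bord cs k ((j-1-k)+1) (j-q) := by
              refine ⟨by omega, fun u hu => ?_⟩
              calc gf cs (k + (((j-1-k)+1)-(j-q)) + u) = gf cs (q + u) := gf_congr cs (by omega)
                _ = gf cs (k+u) := hEq u hu
            rcases hfok0 with ⟨hv1, hmax⟩ | ⟨b, hv1, hb, hmax⟩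
            · exact hmax (j-q) (by omega) hbord
            · exact hmax (j-q) (by omega) hbord
        · left
          intro t hqt heqvt
          rcases Nat.lt_or_ge t (j-q) with hlt3 | hge3
          · exact hD t (by omega) heqvt
          · have ht4 : t = j - q := by omega
            exact absurd (ht4 ▸ heqvt) hEq
    · intro γ hγ hbord
      intro _
      rw [show j - k = (j-1-k)+1 from by omega] at hbord
      rcases hfok0 with ⟨hv1, hmax⟩ | ⟨b, hv1, hb, hmax⟩
      · exact hmax γ (by omega) hbord
      · exact hmax γ (by omega) hbord
    · intro t ht
      exact h.fok t (by omega)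
  obtain ⟨i', k', heq, hLI', hexit⟩ := chase_spec cs j hj2 ((cs++cs).length + 1)
    (fget f (j-1-k)) k f hLI (by rw [List.length_append]; omega)
  have hk'j := hLI'.k_ltj
  have hk'n := hLI'.k_lt
  have hige' := hLI'.i_ge
  have hdj : PySem.List.pyGetD (cs++cs) (j:ℤ) ' ' = gf cs j := dAt cs j hj2
  have hbnd' : ((k':ℤ)+i'+1) < 2*(cs.length:ℤ) := by
    by_cases h0 : 0 ≤ i'
    · have := hLI'.i_lt h0; omega
    · omega
  have hE' : PySem.List.pyGetD (cs++cs) ((k':ℤ)+i'+1) ' ' = gf cs (k' + (i'+1).toNat) := by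
    rw [dAtI cs _ (by omega) (by push_cast; omega)]
    exact gf_congr cs (by omega)
  simp only [boothStep, hi0, heq]
  by_cases h0 : 0 ≤ i'
  · have hmeq := hexit h0
    have hcond : ¬((i' = -1) ∧ PySem.List.pyGetD (cs++cs) (j:ℤ) ' ' ≠ PySem.List.pyGetD (cs++cs) ((k':ℤ)+i'+1) ' ') := by
      rintro ⟨h1, _⟩
      omega
    rw [if_neg hcond]
    refine ⟨PySem.List.pySetD f (((j - k' : ℕ)):ℤ) (i'+1), k', ?_,
      inv_exit_match cs hflen hj2 hLI' (hmeq.trans (gf_congr cs (by omega)))⟩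
    rw [show (j:ℤ) - (k':ℤ) = ((j - k' : ℕ):ℤ) from by omega]
  · have hi' : i' = -1 := by omega
    subst hi'
    have hEk : PySem.List.pyGetD (cs++cs) ((k':ℤ)+(-1)+1) ' ' = gf cs k' := by
      rw [hE']
      exact gf_congr cs (by omega)
    have hEk2 : PySem.List.pyGetD (cs++cs) ((k':ℤ)) ' ' = gf cs k' := dAt cs k' (by omega)
    by_cases hne2 : gf cs j = gf cs k'
    · have hcond : ¬(((-1:ℤ) = -1) ∧ PySem.List.pyGetD (cs++cs) (j:ℤ) ' ' ≠ PySem.List.pyGetD (cs++cs) ((k':ℤ)+(-1)+1) ' ') := by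
        rintro ⟨_, h2⟩
        rw [hdj, hEk] at h2
        exact h2 hne2
      rw [if_neg hcond]
      refine ⟨PySem.List.pySetD f (((j - k' : ℕ)):ℤ) ((-1)+1), k', ?_,
        inv_exit_match cs hflen hj2 hLI' (hne2.trans (gf_congr cs (by omega)))⟩
      rw [show (j:ℤ) - (k':ℤ) = ((j - k' : ℕ):ℤ) from by omega]
    · have hcond : (((-1:ℤ) = -1) ∧ PySem.List.pyGetD (cs++cs) (j:ℤ) ' ' ≠ PySem.List.pyGetD (cs++cs) ((k':ℤ)+(-1)+1) ' ') := by
        refine ⟨rfl, ?_⟩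
        rw [hdj, hEk]
        exact hne2
      rw [if_pos hcond]
      by_cases hcmp : PySem.List.pyGetD (cs++cs) (j:ℤ) ' ' < PySem.List.pyGetD (cs++cs) ((k':ℤ)) ' '
      · rw [if_pos hcmp]
        have hlt2 : gf cs j < gf cs k' := by rw [hdj, hEk2] at hcmp; exact hcmp
        obtain ⟨hjn, hINV⟩ := inv_exit_lt cs hflen hj2 hLI' hlt2
        refine ⟨PySem.List.pySetD f (((0:ℕ)):ℤ) (-1), j, ?_, hINV⟩
        rw [show (j:ℤ) - (j:ℤ) = (((0:ℕ)):ℤ) from by omega]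
      · rw [if_neg hcmp]
        have hgt2 : gf cs k' < gf cs j := by
          have h3 := not_lt.mp hcmp
          rw [hdj, hEk2] at h3
          exact lt_of_le_of_ne h3 (fun hcc => hne2 hcc.symm)
        refine ⟨PySem.List.pySetD f (((j - k' : ℕ)):ℤ) (-1), k', ?_,
          inv_exit_gt cs hflen hj2 hLI' hgt2⟩
        rw [show (j:ℤ) - (k':ℤ) = ((j-k':ℕ):ℤ) from by omega]

-- ---------- whole loop ----------
lemma pyRange_nil (a b : ℤ) (h : b ≤ a) : PySem.List.pyRange a b 1 = [] := by
  simp [PySem.List.pyRange]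
  omega

lemma run_from (cs : List Char) :
    ∀ (d a : ℕ), a + d = 2*cs.length → 1 ≤ a → ∀ (f : List ℤ) (k : ℕ), INV cs (a-1) f k →
    ∃ (f' : List ℤ) (k' : ℕ),
      (PySem.List.pyRange (a:ℤ) (2*(cs.length:ℤ)) 1).foldl (boothStep (cs++cs)) (f, (k:ℤ)) = (f', (k':ℤ)) ∧
      INV cs (2*cs.length - 1) f' k' := by
  intro d
  induction d with
  | zero =>
    intro a ha h1 f k hI
    rw [show (2*(cs.length:ℤ)) = (a:ℤ) from by omega, pyRange_nil a a le_rfl]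
    exact ⟨f, k, rfl, by rw [show 2*cs.length - 1 = a - 1 from by omega]; exact hI⟩
  | succ d ih =>
    intro a ha h1 f k hI
    have ha2 : (a:ℤ) < 2*(cs.length:ℤ) := by push_cast; omega
    rw [PySem.List.pyRange_one_cons ha2, List.foldl_cons]
    obtain ⟨f1, k1, heq, hI1⟩ := step_spec cs a h1 (by omega) f k hI
    rw [heq]
    obtain ⟨f', k', heq2, hI2⟩ := ih (a+1) (by omega) (by omega) f1 k1
      (by rw [show a+1-1 = a from by omega]; exact hI1)
    refine ⟨f', k', ?_, hI2⟩
    rw [show ((a:ℤ)+1) = ((a+1:ℕ):ℤ) from by push_cast; ring]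
    exact heq2


lemma booth_inv (cs : List Char) (hcs : cs ≠ []) :
    ∃ (f' : List ℤ) (k' : ℕ),
      (PySem.List.pyRange 1 (2*(cs.length:ℤ)) 1).foldl (boothStep (cs++cs))
        (List.replicate (2*(cs.length:ℤ)).toNat (-1), 0) = (f', (k':ℤ)) ∧
      INV cs (2*cs.length - 1) f' k' := by
  have hn1 : 1 ≤ cs.length := by
    cases cs with
    | nil => exact absurd rfl hcs
    | cons a l => simp
  have hinit : INV cs 0 (List.replicate (2*(cs.length:ℤ)).toNat (-1)) 0 := by
    refine ⟨le_refl 0, by omega, by simp; omega, ?_, ?_, ?_⟩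
    · intro q h1 h2
      omega
    · intro p hp
      exact absurd hp (by omega)
    · intro t ht
      have ht0 : t = 0 := by omega
      subst ht0
      have hg : fget (List.replicate (2*(cs.length:ℤ)).toNat (-1:ℤ)) 0 = -1 := by
        have hlen : 0 < (List.replicate (2*(cs.length:ℤ)).toNat (-1:ℤ)).length := by
          simp
          omega
        show PySem.List.pyGetD _ (((0:ℕ)):ℤ) 0 = -1
        rw [PySem.List.pyGetD_natCast]
        show ((List.replicate (2*(cs.length:ℤ)).toNat (-1:ℤ))[0]?).getD 0 = -1
        rw [List.getElem?_replicate, if_pos (by simp at hlen; omega)]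
        rfl
      rw [hg]
      exact fok_intro_none cs rfl (fun δ hδ hb => by have := hb.1; omega)
  obtain ⟨f', k', heq, hI⟩ := run_from cs (2*cs.length - 1) 1 (by omega) le_rfl _ 0
    (by rw [show (1:ℕ)-1 = 0 from rfl]; exact hinit)
  refine ⟨f', k', ?_, hI⟩
  rw [show ((1:ℕ):ℤ) = (1:ℤ) from rfl] at heq
  rw [show (((0:ℕ)):ℤ) = (0:ℤ) from rfl] at heq
  exact heq

-- ---------- from the invariant to minimality ----------
lemma rot_min (cs : List Char) (hcs : cs ≠ []) (f : List ℤ) (k : ℕ)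
    (h : INV cs (2*cs.length - 1) f k) : ∀ q, q < cs.length → rot cs k ≤ rot cs q := by
  have hn1 : 1 ≤ cs.length := by
    cases cs with
    | nil => exact absurd rfl hcs
    | cons a l => simp
  have hkn := h.k_lt
  intro q hq
  rcases Nat.lt_trichotomy q k with hqk | hqk | hqk
  · obtain ⟨t0, ht1, ht2, ht3⟩ := h.beat q hqk
    apply lex_le_of_fm
    intro t ht hpre
    rcases Nat.lt_trichotomy t t0 with h2 | h2 | h2
    · exact le_of_eq (ht2 t h2).symm
    · subst h2
      exact le_of_lt ht3
    · exfalso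
      have := hpre t0 h2
      rw [this] at ht3
      exact lt_irrefl _ ht3
  · subst hqk
    exact le_refl _
  · have hD := h.done q hqk (by omega)
    apply lex_le_of_fm
    intro t ht hpre
    exact hD t (by omega) (fun u hu => (hpre u hu).symm)

-- ---------- both ports compute the rotation list ----------
lemma slice_eq_rot (cs : List Char) (k : ℕ) (hk : k < cs.length) :
    PySem.List.slice (cs++cs) (some (k:ℤ)) (some ((k:ℤ) + (cs.length:ℤ))) = rot cs k := by
  rw [PySem.List.slice_natCast_add]
  apply List.ext_getElem
  · simp [rot]
    omega
  · intro t h1 h2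
    simp only [rot, List.getElem_map, List.getElem_range, List.getElem_take, List.getElem_drop]
    exact gf_append cs (k+t) (by simp; simp [rot] at h2; omega)

lemma rots_eq (cs : List Char) (q : ℕ) (hq : q ≤ cs.length) :
    cs.drop q ++ cs.take q = rot cs q := by
  apply List.ext_getElem
  · simp [rot]
    omega
  · intro t h1 h2
    have ht : t < cs.length := by simpa [rot] using h2
    simp only [rot, List.getElem_map, List.getElem_range]
    rw [gf]
    have hlen : (cs.drop q).length = cs.length - q := by simp
    rcases Nat.lt_or_ge t (cs.length - q) with hcase | hcase
    · rw [List.getElem_append_left (by omega)]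
      rw [List.getElem_drop]
      rw [Nat.mod_eq_of_lt (by omega), List.getD_eq_getElem?_getD,
        List.getElem?_eq_getElem (by omega)]
      rfl
    · rw [List.getElem_append_right (by omega)]
      rw [List.getElem_take]
      rw [Nat.mod_eq_sub_mod (by omega), Nat.mod_eq_of_lt (by omega),
        List.getD_eq_getElem?_getD, List.getElem?_eq_getElem (by omega)]
      have hidx : t - (List.drop q cs).length = q + t - cs.length := by omega
      have e : cs[t - (List.drop q cs).length]? = cs[q + t - cs.length]? := by rw [hidx]
      rw [List.getElem?_eq_getElem (by omega), List.getElem?_eq_getElem (by omega)] at e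
      simp only [Option.getD_some]
      exact Option.some.inj e

lemma min_eq_rot (cs : List Char) (hcs : cs ≠ []) (k : ℕ) (hk : k < cs.length)
    (hmin : ∀ q, q < cs.length → rot cs k ≤ rot cs q) :
    PySem.List.min? ((PySem.List.pyRange 0 (cs.length : ℤ) 1).map
        (fun i => PySem.List.slice cs (some i) none ++ PySem.List.slice cs none (some i)))
        (fun x => x) = some (rot cs k) := by
  have hL : (PySem.List.pyRange 0 (cs.length : ℤ) 1).map
      (fun i => PySem.List.slice cs (some i) none ++ PySem.List.slice cs none (some i))
      = (List.range cs.length).map (fun q => rot cs q) := by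
    rw [PySem.List.pyRange_zero_natCast, List.map_map]
    apply List.map_congr_left
    intro q hq
    have hq2 : q < cs.length := List.mem_range.mp hq
    show PySem.List.slice cs (some (q:ℤ)) none ++ PySem.List.slice cs none (some (q:ℤ)) = rot cs q
    rw [PySem.List.slice_from_natCast, PySem.List.slice_to_natCast]
    exact rots_eq cs q (le_of_lt hq2)
  rw [hL]
  have hmem : rot cs k ∈ (List.range cs.length).map (fun q => rot cs q) :=
    List.mem_map.mpr ⟨k, List.mem_range.mpr hk, rfl⟩
  rcases hres : PySem.List.min? ((List.range cs.length).map (fun q => rot cs q)) (fun x => x) with _ | m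
  · rw [PySem.List.min?_eq_none_iff] at hres
    rw [hres] at hmem
    exact absurd hmem (List.not_mem_nil)
  · have hres2 : @PySem.List.min? (List Char) (List Char) LinearOrder.toPartialOrder.toLT
        (@LinearOrder.toDecidableLT (List Char) _) ((List.range cs.length).map (fun q => rot cs q))
        (fun x => x) = some m := by
      convert hres using 2
    have hm1 : m ∈ (List.range cs.length).map (fun q => rot cs q) := PySem.List.min?_mem hres
    obtain ⟨q, hq, hmq⟩ := List.mem_map.mp hm1
    have h1 : m ≤ rot cs k := by simpa using PySem.List.min?_isMin hres2 _ hmem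
    have h2 : rot cs k ≤ m := by
      rw [← hmq]
      exact hmin q (List.mem_range.mp hq)
    rw [le_antisymm h1 h2]

theorem least_rotation_spec : Claim_equal_least_rotation := by
  unfold Claim_equal_least_rotation
  intro s _hdom
  unfold Spec_least_rotation least_rotation least_rotation_alt
  by_cases hnil : s.toList.length = 0
  · rw [if_pos (by exact_mod_cast hnil), if_pos hnil]
  · have hcs : s.toList ≠ [] := fun hh => hnil (by rw [hh]; rfl)
    have hn1 : 1 ≤ s.toList.length := by omega
    rw [if_neg (by exact_mod_cast hnil), if_neg hnil]
    obtain ⟨f', k', heq, hI⟩ := booth_inv s.toList hcs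
    simp only [heq]
    have hkn : k' < s.toList.length := hI.k_lt
    have hmin := rot_min s.toList hcs f' k' hI
    show String.ofList (PySem.List.slice (s.toList ++ s.toList) (some ((k':ℕ):ℤ))
      (some (((k':ℕ):ℤ) + (s.toList.length:ℤ)))) = _
    rw [slice_eq_rot s.toList k' hkn, min_eq_rot s.toList hcs k' hkn hmin]
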